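-- pv_equiv track=rewrite | github.com/hari-sh/cflow | src/python/v2/getcalle.py | partparan
-- ===== SOURCE A (Python) =====
-- def partparan(ipstr):
--     parcount = 0
--     retarr = []
--     startarr = [-1]
--     endarr = [-1]
--     for ind, c in zip(range(len(ipstr)), ipstr):
--         if c == "(":
--             if(parcount==0):
--                 startarr.append(ind+1)
--             parcount = parcount + 1
--         elif c == ")":
--             parcount = parcount - 1
--             if(parcount==0):
--                 endarr.append(ind)
--     for seg in range(len(endarr)-1):
--         retarr.append((ipstr[endarr[seg]+1:endarr[seg+1]+1], ipstr[startarr[seg+1]:endarr[seg+1]]))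
--     return retarr
-- ===== SOURCE B (Python) =====
-- def partparan(ipstr):
--     # single pass: emit each (preceding-text-through-close, inner) tuple the moment
--     # a top-level group closes; no index arrays, no second pairing loop
--     result = []
--     parcount = 0
--     current_start = 0
--     prev_end = -1
--     for ind, c in enumerate(ipstr):
--         if c == "(":
--             if parcount == 0:
--                 current_start = ind + 1
--             parcount += 1
--         elif c == ")":
--             parcount -= 1
--             if parcount == 0:
--                 result.append((ipstr[prev_end + 1:ind + 1], ipstr[current_start:ind]))
--                 prev_end = ind
--     return result
-- ===== Notes on version B (the rewrite author's own statement) =====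
-- stated objective: simpler
-- what changed: B fuses A's two passes into one single scan that emits each (preceding-text, inner-text) tuple the moment a top-level group closes, eliminating A's start/end index arrays and the second pairing loop.
import Mathlib
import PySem

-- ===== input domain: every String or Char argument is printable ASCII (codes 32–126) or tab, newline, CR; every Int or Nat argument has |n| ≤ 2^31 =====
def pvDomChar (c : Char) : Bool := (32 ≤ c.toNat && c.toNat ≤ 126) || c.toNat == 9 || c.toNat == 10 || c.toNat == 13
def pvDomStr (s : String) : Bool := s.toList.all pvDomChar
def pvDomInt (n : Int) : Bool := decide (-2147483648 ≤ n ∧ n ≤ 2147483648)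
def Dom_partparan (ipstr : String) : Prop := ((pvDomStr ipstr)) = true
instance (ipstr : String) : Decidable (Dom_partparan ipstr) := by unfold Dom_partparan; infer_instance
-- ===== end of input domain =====

-- B fuses A's two passes into one: a single scan that emits each (preceding-text, inner-text)
-- tuple the moment a top-level group closes, dropping A's start/end index arrays and the
-- second pairing loop (objective: simpler decomposition, same O(n) cost).

-- ===== PORT A =====
def partparan (ipstr : String) : List (String × String) :=
  let cs := ipstr.toList
  let st := (PySem.List.enumerate cs 0).foldl
    (fun (s : Int × List Int × List Int) (p : Int × Char) =>
      if p.2 = '(' then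
        (s.1 + 1, (if s.1 = 0 then s.2.1 ++ [p.1 + 1] else s.2.1), s.2.2)
      else if p.2 = ')' then
        (s.1 - 1, s.2.1, (if s.1 - 1 = 0 then s.2.2 ++ [p.1] else s.2.2))
      else s)
    (0, [-1], [-1])
  (PySem.List.pyRange 0 ((st.2.2.length : Int) - 1) 1).foldl
    (fun retarr seg =>
      retarr ++ [(String.ofList (PySem.List.slice cs (some (PySem.List.pyGetD st.2.2 seg 0 + 1))
                                               (some (PySem.List.pyGetD st.2.2 (seg + 1) 0 + 1))),
                  String.ofList (PySem.List.slice cs (some (PySem.List.pyGetD st.2.1 (seg + 1) 0))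
                                               (some (PySem.List.pyGetD st.2.2 (seg + 1) 0))))])
    []

-- ===== PORT B =====
def partparan_alt (ipstr : String) : List (String × String) :=
  let cs := ipstr.toList
  ((PySem.List.enumerate cs 0).foldl
    (fun (s : List (String × String) × Int × Int × Int) (p : Int × Char) =>
      if p.2 = '(' then
        (s.1, s.2.1 + 1, (if s.2.1 = 0 then p.1 + 1 else s.2.2.1), s.2.2.2)
      else if p.2 = ')' then
        (if s.2.1 - 1 = 0 then
           (s.1 ++ [(String.ofList (PySem.List.slice cs (some (s.2.2.2 + 1)) (some (p.1 + 1))),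
                     String.ofList (PySem.List.slice cs (some s.2.2.1) (some p.1)))],
            s.2.1 - 1, s.2.2.1, p.1)
         else (s.1, s.2.1 - 1, s.2.2.1, s.2.2.2))
      else s)
    ([], 0, 0, -1)).1

-- ===== PRECONDITION & SPEC =====
def Spec_partparan (ipstr : String) (out : List (String × String)) : Prop := out = partparan_alt ipstr
instance (ipstr : String) (out : List (String × String)) : Decidable (Spec_partparan ipstr out) := by unfold Spec_partparan; infer_instance

-- ===== CLAIM (what is proved, stated in full; the proofs are below) =====
def Claim_equal_partparan : Prop := ∀ (ipstr : String), Dom_partparan ipstr → Spec_partparan ipstr (partparan ipstr)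

-- ===== LEMMAS AND PROOFS =====

-- A's scan step (identical to the lambda in `partparan`)
def stepA (s : Int × List Int × List Int) (p : Int × Char) : Int × List Int × List Int :=
  if p.2 = '(' then
    (s.1 + 1, (if s.1 = 0 then s.2.1 ++ [p.1 + 1] else s.2.1), s.2.2)
  else if p.2 = ')' then
    (s.1 - 1, s.2.1, (if s.1 - 1 = 0 then s.2.2 ++ [p.1] else s.2.2))
  else s

-- B's scan step (identical to the lambda in `partparan_alt`)
def stepB (cs : List Char) (s : List (String × String) × Int × Int × Int) (p : Int × Char) :
    List (String × String) × Int × Int × Int :=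
  if p.2 = '(' then
    (s.1, s.2.1 + 1, (if s.2.1 = 0 then p.1 + 1 else s.2.2.1), s.2.2.2)
  else if p.2 = ')' then
    (if s.2.1 - 1 = 0 then
       (s.1 ++ [(String.ofList (PySem.List.slice cs (some (s.2.2.2 + 1)) (some (p.1 + 1))),
                 String.ofList (PySem.List.slice cs (some s.2.2.1) (some p.1)))],
        s.2.1 - 1, s.2.2.1, p.1)
     else (s.1, s.2.1 - 1, s.2.2.1, s.2.2.2))
  else s

-- one tuple of A's second loop
def pairSeg (cs : List Char) (sa ea : List Int) (seg : Int) : String × String :=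
  (String.ofList (PySem.List.slice cs (some (PySem.List.pyGetD ea seg 0 + 1))
                               (some (PySem.List.pyGetD ea (seg + 1) 0 + 1))),
   String.ofList (PySem.List.slice cs (some (PySem.List.pyGetD sa (seg + 1) 0))
                               (some (PySem.List.pyGetD ea (seg + 1) 0))))

-- A's second loop as a function of the two index arrays
def pairs (cs : List Char) (sa ea : List Int) : List (String × String) :=
  (PySem.List.pyRange 0 ((ea.length : Int) - 1) 1).foldl
    (fun retarr seg => retarr ++ [pairSeg cs sa ea seg]) []

lemma pairs_eq_map (cs : List Char) (sa ea : List Int) :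
    pairs cs sa ea = (PySem.List.pyRange 0 ((ea.length : Int) - 1) 1).map (pairSeg cs sa ea) := by
  unfold pairs
  rw [PySem.List.foldl_append_singleton_eq_map]
  simp

lemma pyGetD_append_lt (xs ys : List Int) (i : Int) (d : Int) (h0 : 0 ≤ i) (h : i < xs.length) :
    PySem.List.pyGetD (xs ++ ys) i d = PySem.List.pyGetD xs i d := by
  rw [PySem.List.pyGetD_of_nonneg _ _ h0, PySem.List.pyGetD_of_nonneg _ _ h0]
  exact List.getD_append _ _ _ _ (by omega)

lemma pyGetD_append_len (xs : List Int) (x d : Int) :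
    PySem.List.pyGetD (xs ++ [x]) (xs.length : Int) d = x := by
  rw [PySem.List.pyGetD_of_nonneg _ _ (by positivity)]
  simp

-- appending to startarr beyond the used indices does not change the pairing
lemma pairs_sa_append (cs : List Char) (sa ea : List Int) (x : Int)
    (h : ea.length ≤ sa.length) :
    pairs cs (sa ++ [x]) ea = pairs cs sa ea := by
  rw [pairs_eq_map, pairs_eq_map]
  refine List.map_congr_left (fun seg hseg => ?_)
  have hb := (PySem.List.mem_pyRange_one.1 hseg)
  unfold pairSeg
  rw [pyGetD_append_lt _ _ _ _ (by omega) (by omega)]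

-- appending a new end emits exactly one new pair at the tail
lemma pairs_ea_append (cs : List Char) (sa ea : List Int) (e : Int)
    (hne : ea ≠ []) (hlen : sa.length = ea.length + 1) :
    pairs cs sa (ea ++ [e]) =
      pairs cs sa ea ++
        [(String.ofList (PySem.List.slice cs (some (PySem.List.pyGetD ea ((ea.length : Int) - 1) 0 + 1)) (some (e + 1))),
          String.ofList (PySem.List.slice cs (some (PySem.List.pyGetD sa ((sa.length : Int) - 1) 0)) (some e)))] := by
  have hpos : 1 ≤ (ea.length : Int) := by
    have := List.length_pos_iff.2 hne; omega
  have hlen' : ((ea ++ [e]).length : Int) - 1 = ((ea.length : Int) - 1) + 1 := by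
    simp
  rw [pairs_eq_map, pairs_eq_map]
  rw [hlen', PySem.List.pyRange_one_succ_right (by omega), List.map_append, List.map_singleton]
  congr 1
  · refine List.map_congr_left (fun seg hseg => ?_)
    have hb := (PySem.List.mem_pyRange_one.1 hseg)
    unfold pairSeg
    rw [pyGetD_append_lt _ _ _ _ (by omega) (by omega),
        pyGetD_append_lt _ _ _ _ (by omega) (by omega)]
  · unfold pairSeg
    have h1 : PySem.List.pyGetD (ea ++ [e]) ((ea.length : Int) - 1) 0
        = PySem.List.pyGetD ea ((ea.length : Int) - 1) 0 :=
      pyGetD_append_lt _ _ _ _ (by omega) (by omega)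
    have h2 : PySem.List.pyGetD (ea ++ [e]) ((ea.length : Int) - 1 + 1) 0 = e := by
      have : (ea.length : Int) - 1 + 1 = (ea.length : Int) := by omega
      rw [this]; exact pyGetD_append_len _ _ _
    have h3 : PySem.List.pyGetD sa ((ea.length : Int) - 1 + 1) 0
        = PySem.List.pyGetD sa ((sa.length : Int) - 1) 0 := by
      congr 1; omega
    rw [h1, h2, h3]

-- the invariant tying A's state to B's state
def StInv (cs : List Char) (a : Int × List Int × List Int)
    (b : List (String × String) × Int × Int × Int) : Prop :=
  b.2.1 = a.1 ∧ a.2.1 ≠ [] ∧ a.2.2 ≠ [] ∧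
  b.2.2.2 = PySem.List.pyGetD a.2.2 ((a.2.2.length : Int) - 1) 0 ∧
  (if 1 ≤ a.1 then a.2.1.length = a.2.2.length + 1 ∧
      b.2.2.1 = PySem.List.pyGetD a.2.1 ((a.2.1.length : Int) - 1) 0
    else a.2.1.length = a.2.2.length) ∧
  b.1 = pairs cs a.2.1 a.2.2

lemma inv_step (cs : List Char) (pc : Int) (sa ea : List Int)
    (res : List (String × String)) (cs0 pe : Int) (p : Int × Char)
    (h : StInv cs (pc, sa, ea) (res, pc, cs0, pe)) :
    StInv cs (stepA (pc, sa, ea) p) (stepB cs (res, pc, cs0, pe) p) := by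
  obtain ⟨-, hsane, heane, hpe, hlen, hres⟩ := h
  simp only at hpe hlen hres
  by_cases hop : p.2 = '('
  · by_cases h0 : pc = 0
    · have e1 : stepA (pc, sa, ea) p = (pc + 1, sa ++ [p.1 + 1], ea) := by
        simp [stepA, hop, h0]
      have e2 : stepB cs (res, pc, cs0, pe) p = (res, pc + 1, p.1 + 1, pe) := by
        simp [stepB, hop, h0]
      rw [e1, e2]
      rw [if_neg (by omega)] at hlen
      refine ⟨rfl, by simp, heane, hpe, ?_, ?_⟩
      · simp only
        rw [if_pos (by omega)]
        constructor
        · simp [hlen]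
        · have hx : ((sa ++ [p.1 + 1]).length : Int) - 1 = (sa.length : Int) := by simp
          rw [hx]
          exact (pyGetD_append_len _ _ _).symm
      · simp only
        rw [hres, pairs_sa_append _ _ _ _ (by omega)]
    · have e1 : stepA (pc, sa, ea) p = (pc + 1, sa, ea) := by
        simp [stepA, hop, h0]
      have e2 : stepB cs (res, pc, cs0, pe) p = (res, pc + 1, cs0, pe) := by
        simp [stepB, hop, h0]
      rw [e1, e2]
      refine ⟨rfl, hsane, heane, hpe, ?_, hres⟩
      simp only
      by_cases h1 : 1 ≤ pc
      · rw [if_pos (by omega)]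
        rw [if_pos h1] at hlen
        exact hlen
      · rw [if_neg (by omega)]
        rw [if_neg h1] at hlen
        exact hlen
  · by_cases hcl : p.2 = ')'
    · by_cases h1 : pc - 1 = 0
      · have e1 : stepA (pc, sa, ea) p = (pc - 1, sa, ea ++ [p.1]) := by
          simp [stepA, hcl, h1]
        have e2 : stepB cs (res, pc, cs0, pe) p =
            (res ++ [(String.ofList (PySem.List.slice cs (some (pe + 1)) (some (p.1 + 1))),
                      String.ofList (PySem.List.slice cs (some cs0) (some p.1)))],
             pc - 1, cs0, p.1) := by
          simp [stepB, hcl, h1]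
        rw [e1, e2]
        rw [if_pos (by omega)] at hlen
        obtain ⟨hlen, hcs0⟩ := hlen
        refine ⟨rfl, hsane, by simp, ?_, ?_, ?_⟩
        · simp only
          have hx : ((ea ++ [p.1]).length : Int) - 1 = (ea.length : Int) := by simp
          rw [hx]
          exact (pyGetD_append_len _ _ _).symm
        · simp only
          rw [if_neg (by omega)]
          simp [hlen]
        · simp only
          rw [hres, pairs_ea_append cs sa ea p.1 heane hlen, hpe, hcs0]
      · have e1 : stepA (pc, sa, ea) p = (pc - 1, sa, ea) := by
          simp [stepA, hcl, h1]
        have e2 : stepB cs (res, pc, cs0, pe) p = (res, pc - 1, cs0, pe) := by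
          simp [stepB, hcl, h1]
        rw [e1, e2]
        refine ⟨rfl, hsane, heane, hpe, ?_, hres⟩
        simp only
        by_cases h2 : 1 ≤ pc - 1
        · rw [if_pos h2]
          rw [if_pos (by omega)] at hlen
          exact hlen
        · rw [if_neg h2]
          rw [if_neg (by omega)] at hlen
          exact hlen
    · have e1 : stepA (pc, sa, ea) p = (pc, sa, ea) := by
        simp [stepA, hop, hcl]
      have e2 : stepB cs (res, pc, cs0, pe) p = (res, pc, cs0, pe) := by
        simp [stepB, hop, hcl]
      rw [e1, e2]
      exact ⟨rfl, hsane, heane, hpe, hlen, hres⟩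

lemma inv_fold (cs : List Char) (l : List (Int × Char)) (a : Int × List Int × List Int)
    (b : List (String × String) × Int × Int × Int) (h : StInv cs a b) :
    StInv cs (l.foldl stepA a) (l.foldl (stepB cs) b) := by
  induction l generalizing a b with
  | nil => exact h
  | cons x xs ih =>
    obtain ⟨pc, sa, ea⟩ := a
    obtain ⟨res, pc', cs0, pe⟩ := b
    obtain rfl : pc' = pc := h.1
    exact ih _ _ (inv_step _ _ _ _ _ _ _ _ h)

-- ===== VERDICT (by name: the statement is the Claim_ definition above) =====
theorem partparan_spec : Claim_equal_partparan := by
  intro ipstr _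
  simp only [Spec_partparan, partparan, partparan_alt]
  set cs := ipstr.toList with hcs
  have h0 : StInv cs (0, [-1], [-1]) ([], 0, 0, -1) := by
    unfold StInv pairs
    refine ⟨rfl, by simp, by simp, by simp [PySem.List.pyGetD], by simp, by simp [PySem.List.pyRange]⟩
  have h := inv_fold cs (PySem.List.enumerate cs 0) _ _ h0
  obtain ⟨-, -, -, -, -, hres⟩ := h
  -- identify the inline folds with stepA / stepB
  show (PySem.List.pyRange 0 _ 1).foldl _ [] = _
  have hA : ((PySem.List.enumerate cs 0).foldl
      (fun (s : Int × List Int × List Int) (p : Int × Char) =>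
        if p.2 = '(' then
          (s.1 + 1, (if s.1 = 0 then s.2.1 ++ [p.1 + 1] else s.2.1), s.2.2)
        else if p.2 = ')' then
          (s.1 - 1, s.2.1, (if s.1 - 1 = 0 then s.2.2 ++ [p.1] else s.2.2))
        else s) (0, [-1], [-1])) = (PySem.List.enumerate cs 0).foldl stepA (0, [-1], [-1]) := rfl
  rw [hA]
  rw [show ((PySem.List.enumerate cs 0).foldl (fun (s : List (String × String) × Int × Int × Int) (p : Int × Char) =>
      if p.2 = '(' then
        (s.1, s.2.1 + 1, (if s.2.1 = 0 then p.1 + 1 else s.2.2.1), s.2.2.2)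
      else if p.2 = ')' then
        (if s.2.1 - 1 = 0 then
           (s.1 ++ [(String.ofList (PySem.List.slice cs (some (s.2.2.2 + 1)) (some (p.1 + 1))),
                     String.ofList (PySem.List.slice cs (some s.2.2.1) (some p.1)))],
            s.2.1 - 1, s.2.2.1, p.1)
         else (s.1, s.2.1 - 1, s.2.2.1, s.2.2.2))
      else s) ([], 0, 0, -1)) = (PySem.List.enumerate cs 0).foldl (stepB cs) ([], 0, 0, -1) from rfl]
  rw [hres]
  rfl
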